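-- pv_equiv track=rewrite | github.com/occupation-ng/public-portfolio | bio-informatics/py/prob024_LONG_0.py | critical_match
-- ===== SOURCE A (Python) =====
-- def critical_match(vec_super_string, vec_fasta_string, all_full_matches):
--     critical_matches = []
--     for _match in all_full_matches:
--         if (len(vec_fasta_string) == len(_match)) or (
--             len(vec_super_string) == (1 + (_match[-1][0] + _match[-1][1]))
--         ):
--             critical_matches.append(_match)
--     # sorted() => lohi
--     if len(critical_matches) > 0:
--         return sorted(
--             filter(
--                 lambda _match: (
--                     len(sorted(critical_matches, key=lambda l: (len(l), l))[-1])
--                     == len(_match)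
--                 ),
--                 critical_matches,
--             ),
--             key=lambda l: l[0][0],
--         )[-1]
--     else:
--         return []
-- ===== SOURCE B (Python) =====
-- def critical_match(vec_super_string, vec_fasta_string, all_full_matches):
--     # One linear pass: keep the best critical match keyed on (length, start);
--     # '>=' makes later elements win ties, matching sorted()[-1] last-wins.
--     best = None
--     for _match in all_full_matches:
--         if len(vec_fasta_string) == len(_match) or (
--             len(vec_super_string) == 1 + (_match[-1][0] + _match[-1][1])
--         ):
--             if best is None or (len(_match), _match[0][0]) >= (len(best), best[0][0]):
--                 best = _match
--     return best if best is not None else []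
-- ===== Notes on version B (the rewrite author's own statement) =====
-- stated objective: simpler
-- what changed: Replaced A's two sorted() passes (with the inner sort re-executed inside the filter lambda for every candidate) by a single linear scan that keeps one best element keyed on (length, start) with last-wins '>=' replacement.
-- outside the precondition, e.g. on critical_match('x', '', [[], [(0, 0)]]): A returns [(0, 0)], B raises IndexError
import Mathlib
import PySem

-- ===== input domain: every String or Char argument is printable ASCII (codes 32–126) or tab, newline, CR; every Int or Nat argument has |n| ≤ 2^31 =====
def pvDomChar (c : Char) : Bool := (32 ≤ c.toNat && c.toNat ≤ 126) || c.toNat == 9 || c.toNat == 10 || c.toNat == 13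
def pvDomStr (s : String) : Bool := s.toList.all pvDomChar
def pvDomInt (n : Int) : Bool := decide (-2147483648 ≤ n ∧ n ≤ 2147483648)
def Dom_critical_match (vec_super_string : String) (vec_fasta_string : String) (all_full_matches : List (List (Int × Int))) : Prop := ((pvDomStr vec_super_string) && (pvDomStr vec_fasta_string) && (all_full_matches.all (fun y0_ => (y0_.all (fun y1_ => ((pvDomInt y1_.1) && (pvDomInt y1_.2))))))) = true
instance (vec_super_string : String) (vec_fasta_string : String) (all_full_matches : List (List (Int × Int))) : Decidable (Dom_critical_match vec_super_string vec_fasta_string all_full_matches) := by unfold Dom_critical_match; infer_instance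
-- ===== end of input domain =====

-- B replaces A's two sorted() passes (the inner one re-run per filtered element) by one
-- linear best-keeping scan on the key (length, start) with last-wins ties (simpler, no sorting).


-- ===== PORT A =====
-- the shared membership test: len(vec_fasta_string) == len(_match) or len(vec_super_string) == 1 + (_match[-1][0] + _match[-1][1])
def pvPred (vec_super_string vec_fasta_string : String) (m : List (Int × Int)) : Bool :=
  (PySem.Str.len vec_fasta_string == (m.length : Int)) ||
  (PySem.Str.len vec_super_string ==
    1 + (((PySem.List.pyGet? m (-1)).getD (0, 0)).1 + ((PySem.List.pyGet? m (-1)).getD (0, 0)).2))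

-- Python's sort key `lambda l: (len(l), l)`: the lexicographic tuple of the length and the
-- list itself (lists and their pairs are also compared lexicographically, as in Python)
def pvKeyA (m : List (Int × Int)) : Lex (Nat × List (Lex (Int × Int))) :=
  toLex (m.length, m.map toLex)

-- l[0][0]
def pvStart (m : List (Int × Int)) : Int := ((PySem.List.pyGet? m 0).getD (0, 0)).1

def critical_match (vec_super_string : String) (vec_fasta_string : String) (all_full_matches : List (List (Int × Int))) : List (Int × Int) :=
  let critical_matches := all_full_matches.foldl
    (fun acc m => if pvPred vec_super_string vec_fasta_string m then acc ++ [m] else acc) []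
  if critical_matches.length > 0 then
    (PySem.List.pyGet?
      (PySem.List.sorted
        (critical_matches.filter (fun m =>
          ((PySem.List.pyGet? (PySem.List.sorted critical_matches pvKeyA) (-1)).getD []).length
            == m.length))
        pvStart) (-1)).getD []
  else []

-- ===== PORT B =====
def critical_match_alt (vec_super_string : String) (vec_fasta_string : String) (all_full_matches : List (List (Int × Int))) : List (Int × Int) :=
  (all_full_matches.foldl
    (fun best m =>
      if pvPred vec_super_string vec_fasta_string m then
        match best with
        | none => some m
        | some b =>
          if b.length < m.length || (b.length == m.length && pvStart b ≤ pvStart m) then some m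
          else some b
      else best) none).getD []

-- ===== PRECONDITION & SPEC =====
-- Pre_ excludes inputs containing an empty match list: there Python A indexes _match[-1] or l[0]
-- on an empty list (IndexError) on most such inputs, and on the rest (empty vec_fasta_string) B
-- itself raises IndexError on _match[0][0].
def Pre_critical_match (vec_super_string : String) (vec_fasta_string : String) (all_full_matches : List (List (Int × Int))) : Prop :=
  ∀ m ∈ all_full_matches, m ≠ []
instance (vec_super_string : String) (vec_fasta_string : String) (all_full_matches : List (List (Int × Int))) : Decidable (Pre_critical_match vec_super_string vec_fasta_string all_full_matches) := by unfold Pre_critical_match; infer_instance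

def pvWitness_critical_match : String × String × (List (List (Int × Int))) := ("ab", "a", [[(0, 1)]])

def Spec_critical_match (vec_super_string : String) (vec_fasta_string : String) (all_full_matches : List (List (Int × Int))) (out : List (Int × Int)) : Prop := out = critical_match_alt vec_super_string vec_fasta_string all_full_matches
instance (vec_super_string : String) (vec_fasta_string : String) (all_full_matches : List (List (Int × Int))) (out : List (Int × Int)) : Decidable (Spec_critical_match vec_super_string vec_fasta_string all_full_matches out) := by unfold Spec_critical_match; infer_instance

-- ===== CLAIM (what is proved, stated in full; the proofs are below) =====
def Claim_equal_critical_match : Prop := ∀ (vec_super_string : String) (vec_fasta_string : String) (all_full_matches : List (List (Int × Int))), Dom_critical_match vec_super_string vec_fasta_string all_full_matches → Pre_critical_match vec_super_string vec_fasta_string all_full_matches → Spec_critical_match vec_super_string vec_fasta_string all_full_matches (critical_match vec_super_string vec_fasta_string all_full_matches)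

-- ===== LEMMAS AND PROOFS =====

-- last-wins running maximum under a key: the shape both reductions share
def pvFoldMax {κ : Type} [LinearOrder κ] (key : List (Int × Int) → κ) (xs : List (List (Int × Int))) : Option (List (Int × Int)) :=
  xs.foldl (fun b y => match b with
    | none => some y
    | some b => if key b ≤ key y then some y else some b) none

def pvBestOf (xs : List (List (Int × Int))) : Option (List (Int × Int)) :=
  xs.foldl (fun best m => match best with
    | none => some m
    | some b =>
      if b.length < m.length || (b.length == m.length && pvStart b ≤ pvStart m) then some m
      else some b) none

-- running maximum of the lengths
def pvMLen (xs : List (List (Int × Int))) : Option Nat :=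
  xs.foldl (fun o y => match o with
    | none => some y.length
    | some n => some (max n y.length)) none

lemma pvFoldMax_append {κ : Type} [LinearOrder κ] (key : List (Int × Int) → κ)
    (xs : List (List (Int × Int))) (x : List (Int × Int)) :
    pvFoldMax key (xs ++ [x]) = some (match pvFoldMax key xs with
      | none => x
      | some b => if key b ≤ key x then x else b) := by
  unfold pvFoldMax
  rw [List.foldl_append]
  rcases h : List.foldl _ (none : Option (List (Int × Int))) xs with _ | b
  · rfl
  · simp only [List.foldl_cons, List.foldl_nil]; split <;> rfl
lemma pvBestOf_append (xs : List (List (Int × Int))) (x : List (Int × Int)) :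
    pvBestOf (xs ++ [x]) = some (match pvBestOf xs with
      | none => x
      | some b =>
        if b.length < x.length || (b.length == x.length && pvStart b ≤ pvStart x) then x
        else b) := by
  unfold pvBestOf
  rw [List.foldl_append]
  rcases h : List.foldl _ (none : Option (List (Int × Int))) xs with _ | b
  · rfl
  · simp only [List.foldl_cons, List.foldl_nil]; split <;> rfl
lemma pvMLen_append (xs : List (List (Int × Int))) (x : List (Int × Int)) :
    pvMLen (xs ++ [x]) = some (match pvMLen xs with
      | none => x.length
      | some n => max n x.length) := by
  unfold pvMLen
  rw [List.foldl_append]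
  rcases h : List.foldl _ (none : Option Nat) xs with _ | n <;> rfl

lemma pvMLen_cons (a : List (Int × Int)) (t : List (List (Int × Int))) :
    ∃ n, pvMLen (a :: t) = some n := by
  suffices h : ∀ (t : List (List (Int × Int))) (k : Nat),
      ∃ n, List.foldl (fun o y => match o with
        | none => some y.length
        | some n => some (max n y.length)) (some k) t = some n by
    simpa [pvMLen] using h t a.length
  intro t
  induction t with
  | nil => intro k; exact ⟨k, rfl⟩
  | cons b tt ih => intro k; simpa using ih (max k b.length)

lemma pvMLen_eq_none_iff (xs : List (List (Int × Int))) : pvMLen xs = none ↔ xs = [] := by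
  cases xs with
  | nil => simp [pvMLen]
  | cons a t =>
    rcases pvMLen_cons a t with ⟨n, hn⟩
    simp [hn]
lemma pvMLen_ub (xs : List (List (Int × Int))) (n : Nat) (h : pvMLen xs = some n) :
    ∀ y ∈ xs, y.length ≤ n := by
  induction xs using List.reverseRecOn generalizing n with
  | nil => simp
  | append_singleton xs x ih =>
    rw [pvMLen_append] at h
    intro y hy
    rcases List.mem_append.mp hy with hy | hy
    · rcases hm : pvMLen xs with _ | k
      · rw [(pvMLen_eq_none_iff xs).mp hm] at hy; simp at hy
      · rw [hm] at h
        have := ih k hm y hy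
        rw [Option.some_inj] at h
        have h' : max k x.length = n := h
        have h2 := Nat.le_max_left k x.length
        omega
    · simp only [List.mem_singleton] at hy
      subst hy
      rcases hm : pvMLen xs with _ | k <;> rw [hm] at h <;> rw [Option.some_inj] at h
      · have h' : y.length = n := h
        omega
      · have h' : max k y.length = n := h
        have h2 := Nat.le_max_right k y.length
        omega
lemma pvFoldMaxA_len (xs : List (List (Int × Int))) :
    (pvFoldMax pvKeyA xs).map List.length = pvMLen xs := by
  induction xs using List.reverseRecOn with
  | nil => rfl
  | append_singleton xs x ih =>
    rw [pvFoldMax_append, pvMLen_append]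
    rcases h : pvFoldMax pvKeyA xs with _ | b
    · rw [h] at ih; simp [pvMLen] at ih ⊢; rw [← ih]
    · rw [h] at ih
      rcases hm : pvMLen xs with _ | n
      · rw [hm] at ih; simp at ih
      · rw [hm] at ih
        simp only [Option.map_some, Option.some.injEq] at ih ⊢
        subst ih
        by_cases hle : pvKeyA b ≤ pvKeyA x
        · simp only [hle, if_true]
          have : b.length ≤ x.length := by
            have := (Prod.Lex.le_iff).mp hle
            rcases this with h1 | ⟨h1, _⟩ <;>
              simp [pvKeyA] at h1 <;> omega
          exact (Nat.max_eq_right this).symm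
        · simp only [hle, if_false]
          have : x.length ≤ b.length := by
            have hlt : pvKeyA x < pvKeyA b := lt_of_not_ge hle
            have := (Prod.Lex.lt_iff).mp hlt
            rcases this with h1 | ⟨h1, _⟩ <;>
              simp [pvKeyA] at h1 <;> omega
          exact (Nat.max_eq_left this).symm
lemma pvBestOf_len (xs : List (List (Int × Int))) :
    (pvBestOf xs).map List.length = pvMLen xs := by
  induction xs using List.reverseRecOn with
  | nil => rfl
  | append_singleton xs x ih =>
    rw [pvBestOf_append, pvMLen_append]
    rcases h : pvBestOf xs with _ | b
    · rw [h] at ih; simp [pvMLen] at ih ⊢; rw [← ih]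
    · rw [h] at ih
      rcases hm : pvMLen xs with _ | n
      · rw [hm] at ih; simp at ih
      · rw [hm] at ih
        simp only [Option.map_some, Option.some.injEq] at ih ⊢
        subst ih
        by_cases hc : (b.length < x.length || (b.length == x.length && pvStart b ≤ pvStart x)) = true
        · simp only [hc, if_true]
          simp at hc
          have hbl : b.length ≤ x.length := by rcases hc with h1 | ⟨h1, _⟩ <;> omega
          exact (Nat.max_eq_right hbl).symm
        · simp only [hc]
          simp at hc
          have hbl : x.length ≤ b.length := by have := hc.1; omega
          exact (Nat.max_eq_left hbl).symm

lemma pvGetLast_cons_ne {α : Type} (a : α) (l : List α) (h : l ≠ []) :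
    (a :: l).getLast? = l.getLast? := by
  rcases l with _ | ⟨b, t⟩
  · simp at h
  · simp [List.getLast?_cons_cons]

lemma pvInsertBy_getLast {κ : Type} [LinearOrder κ] (key : List (Int × Int) → κ)
    (x : List (Int × Int)) (ys : List (List (Int × Int)))
    (h : ys.Pairwise (fun a b => key a ≤ key b)) :
    (PySem.List.insertBy (fun a b => decide (key a < key b)) x ys).getLast? =
      some (match ys.getLast? with
        | none => x
        | some l => if key l ≤ key x then x else l) := by
  induction ys with
  | nil => rfl
  | cons y t ih =>
    rw [List.pairwise_cons] at h
    have hlast : ∀ l, (y :: t).getLast? = some l → key y ≤ key l := by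
      intro l hl
      have hm : l ∈ y :: t := List.mem_of_getLast? hl
      rcases List.mem_cons.mp hm with rfl | hm
      · exact le_refl _
      · exact h.1 l hm
    rw [PySem.List.insertBy]
    by_cases hxy : key x < key y
    · simp only [hxy, decide_true, if_true]
      rcases hl : (y :: t).getLast? with _ | l
      · simp at hl
      · have h1 : key y ≤ key l := hlast l hl
        have h2 : ¬ key l ≤ key x := by
          intro hc; exact absurd (lt_of_le_of_lt (le_trans h1 hc) hxy) (lt_irrefl _)
        simp only [List.getLast?_cons_cons] at hl ⊢
        rcases t with _ | ⟨a, t⟩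
        · simp at hl; subst hl; simp [h2]
        · rw [hl]; simp [h2]
    · simp only [hxy, decide_false, Bool.false_eq_true, if_false]
      have hr := ih h.2
      rcases t with _ | ⟨a, t⟩
      · have hyx : key y ≤ key x := not_lt.mp hxy
        simp [PySem.List.insertBy, hyx]
      · have hne : PySem.List.insertBy (fun a b => decide (key a < key b)) x (a :: t) ≠ [] := by
          rw [PySem.List.insertBy]; split <;> simp
        rw [pvGetLast_cons_ne _ _ hne, hr, List.getLast?_cons_cons]

lemma pvGet_neg_one {α : Type} (xs : List α) : PySem.List.pyGet? xs (-1) = xs.getLast? := by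
  cases xs with
  | nil => rfl
  | cons a t =>
    simp [PySem.List.pyGet?, PySem.List.pyIdx?, List.getLast?_eq_getElem?]

lemma pvSorted_getLast {κ : Type} [LinearOrder κ] (key : List (Int × Int) → κ)
    (xs : List (List (Int × Int))) :
    (PySem.List.sorted xs key).getLast? = pvFoldMax key xs := by
  induction xs using List.reverseRecOn with
  | nil => rfl
  | append_singleton xs x ih =>
    rw [PySem.List.sorted_eq_foldl_insertBy] at ih ⊢
    rw [List.foldl_append, List.foldl_cons, List.foldl_nil]
    rw [pvInsertBy_getLast key x _ (by
      have := PySem.List.sorted_pairwise xs key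
      rwa [PySem.List.sorted_eq_foldl_insertBy] at this)]
    rw [ih, pvFoldMax_append]

lemma pvFoldMax_eq_none_iff {κ : Type} [LinearOrder κ] (key : List (Int × Int) → κ)
    (xs : List (List (Int × Int))) : pvFoldMax key xs = none ↔ xs = [] := by
  rw [← pvSorted_getLast]
  simp [List.getLast?_eq_none_iff, PySem.List.sorted_eq_nil_iff]

lemma pvBestOf_eq_none_iff (xs : List (List (Int × Int))) : pvBestOf xs = none ↔ xs = [] := by
  constructor
  · intro h
    by_contra hne
    rcases xs with _ | ⟨a, t⟩
    · exact hne rfl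
    · have := pvBestOf_len (a :: t)
      rw [h] at this
      rcases pvMLen_cons a t with ⟨n, hn⟩
      rw [hn] at this; simp at this
  · rintro rfl; rfl

lemma pvMain (xs : List (List (Int × Int))) (n : Nat) (h : pvMLen xs = some n) :
    pvFoldMax pvStart (xs.filter (fun m => n == m.length)) = pvBestOf xs := by
  induction xs using List.reverseRecOn generalizing n with
  | nil => simp [pvMLen] at h
  | append_singleton xs x ih =>
    rw [pvMLen_append] at h
    rw [Option.some_inj] at h
    rw [List.filter_append, pvBestOf_append]
    rcases hm : pvMLen xs with _ | k
    · -- xs = []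
      rw [(pvMLen_eq_none_iff xs).mp hm]
      rw [hm] at h
      have hn : n = x.length := h.symm ▸ rfl
      simp [pvBestOf, hn, pvFoldMax]
    · rw [hm] at h
      have hk : max k x.length = n := h
      have hub := pvMLen_ub xs k hm
      have hbs : ∃ b, pvBestOf xs = some b := by
        rcases hb : pvBestOf xs with _ | b
        · rw [(pvBestOf_eq_none_iff xs).mp hb] at hm; simp [pvMLen] at hm
        · exact ⟨b, rfl⟩
      rcases hbs with ⟨b, hb⟩
      have hblen : b.length = k := by
        have := pvBestOf_len xs
        rw [hb, hm] at this; simpa using this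
      rw [hb]
      rcases Nat.lt_trichotomy k x.length with hlt | heq | hgt
      · -- new element strictly longer: filter keeps only x
        have hn : n = x.length := by omega
        subst hn
        have hfx : xs.filter (fun m => x.length == m.length) = [] := by
          rw [List.filter_eq_nil_iff]
          intro m hmem
          have := hub m hmem
          simp; omega
        rw [hfx]
        have hcond : (b.length < x.length || (b.length == x.length && pvStart b ≤ pvStart x)) = true := by
          simp; omega
        simp only [hcond, if_true]
        simp [pvFoldMax]
      · -- equal length: filter keeps x at the end
        have hn : n = k := by omega
        subst hn
        have hfil : List.filter (fun m => n == m.length) [x] = [x] := by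
          simp [← heq]
        rw [hfil, pvFoldMax_append, ih n hm, hb]
        have hxb : (b.length == x.length) = true := by simp; omega
        have hnlt : ¬ b.length < x.length := by omega
        by_cases hs : pvStart b ≤ pvStart x
        · have : (b.length < x.length || (b.length == x.length && pvStart b ≤ pvStart x)) = true := by
            simp [hxb, hs]
          simp [hs]
          intro _ h2
          exact absurd (by omega) h2
        · have : (b.length < x.length || (b.length == x.length && pvStart b ≤ pvStart x)) = false := by
            simp [hs]; omega
          simp [hs]
          intro h1
          exact absurd h1 (by omega)
      · -- new element shorter: filter drops x
        have hn : n = k := by omega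
        subst hn
        have hfil : List.filter (fun m => n == m.length) [x] = [] := by
          simp; omega
        rw [hfil, List.append_nil, ih n hm, hb]
        have : (b.length < x.length || (b.length == x.length && pvStart b ≤ pvStart x)) = false := by
          simp; omega
        simp [this]

lemma pvAlt_fold (ss fs : String) (afm : List (List (Int × Int))) :
    afm.foldl
      (fun best m =>
        if pvPred ss fs m then
          match best with
          | none => some m
          | some b =>
            if b.length < m.length || (b.length == m.length && pvStart b ≤ pvStart m) then some m
            else some b
        else best) none = pvBestOf (afm.filter (pvPred ss fs)) := by
  unfold pvBestOf
  generalize (none : Option (List (Int × Int))) = b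
  induction afm generalizing b with
  | nil => rfl
  | cons a t ih =>
    by_cases hp : pvPred ss fs a
    · simp only [List.foldl_cons, List.filter_cons, hp, if_true]
      exact ih _
    · simp only [List.foldl_cons, List.filter_cons, hp, Bool.false_eq_true, if_false]
      exact ih _

-- ===== VERDICT (by name: the statement is the Claim_ definition above) =====
theorem critical_match_spec : Claim_equal_critical_match := by
  intro vec_super_string vec_fasta_string all_full_matches _ _
  unfold Spec_critical_match critical_match critical_match_alt
  have hcrit : all_full_matches.foldl (fun acc m => if pvPred vec_super_string vec_fasta_string m then acc ++ [m] else acc) [] =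
      all_full_matches.filter (pvPred vec_super_string vec_fasta_string) := by
    simpa using PySem.List.foldl_append_if (pvPred vec_super_string vec_fasta_string) (fun m => m) all_full_matches []
  rw [pvAlt_fold]
  simp only [hcrit]
  by_cases hc : all_full_matches.filter (pvPred vec_super_string vec_fasta_string) = []
  · simp [hc, pvBestOf]
  · rcases ha : pvFoldMax pvKeyA (all_full_matches.filter (pvPred vec_super_string vec_fasta_string)) with _ | a
    · exact absurd ((pvFoldMax_eq_none_iff _ _).mp ha) hc
    · have hlen : pvMLen (all_full_matches.filter (pvPred vec_super_string vec_fasta_string)) = some a.length := by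
        have := pvFoldMaxA_len (all_full_matches.filter (pvPred vec_super_string vec_fasta_string))
        rw [ha] at this; simpa using this.symm
      have hlen' : (all_full_matches.filter (pvPred vec_super_string vec_fasta_string)).length > 0 := by
        rcases List.exists_cons_of_ne_nil hc with ⟨y, t, hyt⟩; simp [hyt]
      rw [if_pos hlen']
      simp only [pvGet_neg_one, pvSorted_getLast, ha, Option.getD_some]
      rw [pvMain _ a.length hlen]
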